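-- pv_equiv track=rewrite | github.com/hanzhi713/thinkcs-python3-solutions | Chapter 14/E5.py | prime_misses
-- ===== SOURCE A (Python) =====
-- def PriNumGenerator(upperlimit):
--     Plist = [2]
--     for num in range(2, upperlimit + 1):
--         isprime = True
--         for i in Plist:
--             if num % i == 0:
--                 isprime = False
--                 break
--         if isprime == True:
--             Plist.append(num)
--     return Plist
--
-- def prime_misses(l):
--     prime_list = PriNumGenerator(50)
--     result = []
--     new = []
--     for i in range(len(l)):
--         new += l[i]
--     for item in prime_list:
--         if item in new:
--             continue
--         else:
--             result.append(item)
--     return result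
-- ===== SOURCE B (Python) =====
-- def prime_misses(l):
--     limit = 50
--     # Sieve of Eratosthenes over 0..limit
--     is_comp = [False] * (limit + 1)
--     for p in range(2, limit + 1):
--         if not is_comp[p]:
--             for m in range(p * p, limit + 1, p):
--                 is_comp[m] = True
--     primes = [p for p in range(2, limit + 1) if not is_comp[p]]
--     seen = set()
--     for sub in l:
--         seen.update(sub)
--     return [p for p in primes if p not in seen]
-- ===== Notes on version B (the rewrite author's own statement) =====
-- stated objective: alternative
-- what changed: Replaces trial division against the growing prime list with a Sieve of Eratosthenes for the primes up to 50, and replaces the quadratic membership scan over a repeatedly concatenated flat list with a hash set built once from the sublists.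
import Mathlib
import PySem

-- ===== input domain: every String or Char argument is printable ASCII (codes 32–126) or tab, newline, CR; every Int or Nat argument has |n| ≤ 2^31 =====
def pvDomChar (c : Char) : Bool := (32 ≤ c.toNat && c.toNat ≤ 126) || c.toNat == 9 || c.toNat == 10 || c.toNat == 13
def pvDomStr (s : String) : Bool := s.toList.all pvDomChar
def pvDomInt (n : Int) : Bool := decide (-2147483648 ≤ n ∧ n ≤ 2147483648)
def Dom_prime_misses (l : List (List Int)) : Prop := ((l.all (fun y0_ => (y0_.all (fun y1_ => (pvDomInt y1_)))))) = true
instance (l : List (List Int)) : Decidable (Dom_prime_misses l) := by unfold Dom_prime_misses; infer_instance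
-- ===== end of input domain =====

-- B replaces trial division with a Sieve of Eratosthenes and the quadratic membership scan
-- over a concatenated list with a set built once (objective: alternative).


-- ===== PORT A =====
def PriNumGenerator (upperlimit : Int) : List Int :=
  (PySem.List.pyRange 2 (upperlimit + 1) 1).foldl
    (fun Plist num =>
      -- 'for i in Plist: if num % i == 0: isprime = False; break' leaves isprime false iff some i divides num
      let isprime : Bool := !(Plist.any (fun i => PySem.Int.mod num i == 0))
      if isprime = true then Plist ++ [num] else Plist)
    [2]

def prime_misses (l : List (List Int)) : List Int :=
  let prime_list := PriNumGenerator 50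
  let result : List Int := []
  -- 'for i in range(len(l)): new += l[i]'; the index i is always in range, so pyGetD is exact here
  let new : List Int :=
    (PySem.List.pyRange 0 (l.length : Int) 1).foldl (fun new i => new ++ (PySem.List.pyGetD l i [])) []
  prime_list.foldl (fun result item => if new.contains item then result else result ++ [item]) result

-- ===== PORT B =====
-- Sieve of Eratosthenes over 0..50; indices are in 2..50, so List.getD/set at p.toNat are exact
def altPrimes : List Int :=
  let limit : Int := 50
  let isComp : List Bool :=
    (PySem.List.pyRange 2 (limit + 1) 1).foldl
      (fun arr p =>
        if arr.getD p.toNat false = false then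
          (PySem.List.pyRange (p * p) (limit + 1) p).foldl (fun a m => a.set m.toNat true) arr
        else arr)
      (List.replicate 51 false)
  (PySem.List.pyRange 2 (limit + 1) 1).filter (fun p => !(isComp.getD p.toNat false))

def prime_misses_alt (l : List (List Int)) : List Int :=
  let primes := altPrimes
  let seen : PySem.Set Int := l.foldl (fun s sub => PySem.Set.update s sub) PySem.Set.empty
  primes.filter (fun p => !(PySem.Set.contains seen p))

-- ===== PRECONDITION & SPEC =====
def Spec_prime_misses (l : List (List Int)) (out : List Int) : Prop := out = prime_misses_alt l
instance (l : List (List Int)) (out : List Int) : Decidable (Spec_prime_misses l out) := by unfold Spec_prime_misses; infer_instance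

-- ===== CLAIM (what is proved, stated in full; the proofs are below) =====
def Claim_equal_prime_misses : Prop := ∀ (l : List (List Int)), Dom_prime_misses l → Spec_prime_misses l (prime_misses l)

-- ===== LEMMAS AND PROOFS =====
-- both prime generators produce the same literal list of primes ≤ 50
set_option maxRecDepth 8192 in
theorem primes_eq : PriNumGenerator 50 = altPrimes := by decide

theorem new_eq_flatten (l : List (List Int)) :
    (PySem.List.pyRange 0 (l.length : Int) 1).foldl
      (fun new i => new ++ (PySem.List.pyGetD l i [])) [] = l.flatten := by
  have h := PySem.List.foldl_pyRange_pyGetD l [] (fun acc x => acc ++ x) [] (le_refl 0)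
  simpa [PySem.List.len, PySem.List.foldl_append_eq_flatten] using h

theorem mem_seen (l : List (List Int)) (x : Int) :
    x ∈ l.foldl (fun s sub => PySem.Set.update s sub) PySem.Set.empty ↔ x ∈ l.flatten := by
  suffices h : ∀ (s : PySem.Set Int),
      x ∈ l.foldl (fun s sub => PySem.Set.update s sub) s ↔ x ∈ s ∨ x ∈ l.flatten by
    simpa [PySem.Set.empty] using h PySem.Set.empty
  induction l with
  | nil => simp
  | cons h t ih =>
      intro s
      simp [List.foldl_cons, ih, PySem.Set.mem_update]
      tauto

theorem prime_misses_spec' (l : List (List Int)) : prime_misses l = prime_misses_alt l := by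
  unfold prime_misses prime_misses_alt
  simp only [primes_eq, new_eq_flatten]
  rw [show (fun (result : List Int) item => if (l.flatten).contains item then result else result ++ [item])
        = (fun result item => if !(l.flatten).contains item then result ++ [item] else result) by
      funext result item
      by_cases hc : ∃ t ∈ l, item ∈ t
      · simp [hc]
      · simp [hc]]
  rw [PySem.List.foldl_append_if_eq_filter]
  simp only [List.nil_append]
  apply List.filter_congr
  intro p _
  have hs := mem_seen l p
  simp only [PySem.Set.empty] at hs
  simp [PySem.Set.contains, hs]

-- ===== VERDICT (by name: the statement is the Claim_ definition above) =====
set_option maxRecDepth 8192 in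
theorem prime_misses_spec : Claim_equal_prime_misses := by
  intro l _
  unfold Spec_prime_misses
  exact prime_misses_spec' l
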